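-- pv_equiv track=rewrite | github.com/tvsirius/mit_cds_workshops | cdsw1_exercises/filter_collections_recursion.py | filter_collections_recursion
-- ===== SOURCE A (Python) =====
-- def filter_collections_recursion(task_list: list[list | str | tuple | set], elem) -> list[list | str | tuple | set]:
--     """ Return a list of iterables (or strings, selected from task_list, where elem is present
--
--     :param task_list: list of iterables (or strings)
--     :param elem: element to search in the lists (str if task_list is list of strings)
--     :return: a list of iterables, where elem is present
--
--     >>> filter_collections_recursion([[]],1)
--     []
--
--     >>> filter_collections_recursion([[1]],1)
--     [[1]]
--
--     >>> filter_collections_recursion([[1,2],[2,3,4],[3,4,5],[5,6]],3)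
--     [[2, 3, 4], [3, 4, 5]]
--
--     >>> filter_collections_recursion(['abc','bdf','xyz','hfv'],'f')
--     ['bdf', 'hfv']
--     """
--
--     # assert correct params
--     assert isinstance(task_list, list), "task_list must be list"
--     if isinstance(elem, str):
--         for list_item in task_list:
--             assert isinstance(list_item, str), "If elem is str, list elements must be strings"
--     else:
--         for list_item in task_list:
--             assert isinstance(list_item, (list, tuple, set)), "If elem is not string, list elements must be iterables"
--
--     # base case
--     if len(task_list) == 0:
--         return []
--
--     # check condition on first element
--     if elem in task_list[0]:
--         # recursion with shortening list, condition success
--         return [task_list[0]] + filter_collections_recursion(task_list[1:], elem)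
--
--     # recursion with shortening list, condition fail
--     return filter_collections_recursion(task_list[1:], elem)
-- ===== SOURCE B (Python) =====
-- def filter_collections_recursion(task_list: list[list | str | tuple | set], elem) -> list[list | str | tuple | set]:
--     # same upfront validation as A
--     assert isinstance(task_list, list), "task_list must be list"
--     if isinstance(elem, str):
--         for list_item in task_list:
--             assert isinstance(list_item, str), "If elem is str, list elements must be strings"
--     else:
--         for list_item in task_list:
--             assert isinstance(list_item, (list, tuple, set)), "If elem is not string, list elements must be iterables"
--     # single iterative pass with an accumulator (no recursion, no slicing)
--     result = []
--     for item in task_list: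
--         if elem in item:
--             result.append(item)
--     return result
-- ===== Notes on version B (the rewrite author's own statement) =====
-- stated objective: faster
-- what changed: Replaces recursion over tail slices (which copies the remaining list and re-runs the type-validation pass at every level) with one iterative accumulator loop after a single upfront validation.
import Mathlib
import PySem

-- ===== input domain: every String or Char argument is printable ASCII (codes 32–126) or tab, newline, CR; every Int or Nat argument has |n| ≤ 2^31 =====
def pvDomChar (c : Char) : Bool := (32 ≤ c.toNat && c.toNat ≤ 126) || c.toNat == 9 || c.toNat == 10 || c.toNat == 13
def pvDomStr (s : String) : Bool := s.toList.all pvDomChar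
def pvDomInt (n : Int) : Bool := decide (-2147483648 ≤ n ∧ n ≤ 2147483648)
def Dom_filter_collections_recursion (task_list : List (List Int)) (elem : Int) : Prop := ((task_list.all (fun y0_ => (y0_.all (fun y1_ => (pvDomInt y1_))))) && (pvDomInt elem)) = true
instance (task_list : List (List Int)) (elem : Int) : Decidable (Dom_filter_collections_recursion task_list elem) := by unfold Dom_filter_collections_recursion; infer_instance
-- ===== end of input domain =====

-- ===== PORT A =====
-- A: structural recursion on the list, prepending the head when elem is a member
-- (Python's task_list[1:] is the tail of a nonempty list; the isinstance asserts
-- always succeed on the typed domain List (List Int)).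
def filter_collections_recursion (task_list : List (List Int)) (elem : Int) : List (List Int) :=
  match task_list with
  | [] => []
  | x :: rest =>
      if elem ∈ x then [x] ++ filter_collections_recursion rest elem
      else filter_collections_recursion rest elem

-- ===== PORT B =====
-- B: one iterative pass with an accumulator (the Python result/append loop as a foldl).
def filter_collections_recursion_alt (task_list : List (List Int)) (elem : Int) : List (List Int) :=
  task_list.foldl (fun result item => if elem ∈ item then result ++ [item] else result) []

-- ===== PRECONDITION & SPEC =====
def Spec_filter_collections_recursion (task_list : List (List Int)) (elem : Int) (out : List (List Int)) : Prop := out = filter_collections_recursion_alt task_list elem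
instance (task_list : List (List Int)) (elem : Int) (out : List (List Int)) : Decidable (Spec_filter_collections_recursion task_list elem out) := by unfold Spec_filter_collections_recursion; infer_instance

-- ===== CLAIM =====
def Claim_equal_filter_collections_recursion : Prop := ∀ (task_list : List (List Int)) (elem : Int), Dom_filter_collections_recursion task_list elem → Spec_filter_collections_recursion task_list elem (filter_collections_recursion task_list elem)

-- ===== LEMMAS AND PROOFS =====
theorem filter_rec_eq_filter (task_list : List (List Int)) (elem : Int) :
    filter_collections_recursion task_list elem = task_list.filter (fun x => decide (elem ∈ x)) := by
  induction task_list with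
  | nil => rfl
  | cons x rest ih =>
      simp only [filter_collections_recursion, List.filter_cons, ih]
      by_cases h : elem ∈ x <;> simp [h]

theorem filter_alt_eq_filter (task_list : List (List Int)) (elem : Int) :
    filter_collections_recursion_alt task_list elem = task_list.filter (fun x => decide (elem ∈ x)) := by
  unfold filter_collections_recursion_alt
  rw [PySem.List.foldl_append_ite_eq_filter]
  simp

-- ===== VERDICT =====
theorem filter_collections_recursion_spec : Claim_equal_filter_collections_recursion := by
  intro task_list elem _
  unfold Spec_filter_collections_recursion
  rw [filter_rec_eq_filter, filter_alt_eq_filter]
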